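-- pv_equiv track=rewrite | github.com/axiomantic/spellbook | installer/version.py | check_upgrade_needed
-- ===== SOURCE A (Python) =====
-- from typing import List, Optional, Tuple
--
-- def check_upgrade_needed(
--     installed_version: Optional[str], current_version: str, force: bool = False
-- ) -> Tuple[bool, str]:
--     """
--     Determine if upgrade is needed.
--
--     Returns: (needs_upgrade, reason)
--     """
--     if force:
--         return (True, "forced reinstall")
--
--     if installed_version is None:
--         return (True, "fresh install")
--
--     if installed_version == current_version:
--         return (False, "version unchanged")
--
--     # Parse versions for comparison
--     try:
--         installed_parts = [int(x) for x in installed_version.split(".")]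
--         current_parts = [int(x) for x in current_version.split(".")]
--
--         # Pad to same length
--         max_len = max(len(installed_parts), len(current_parts))
--         installed_parts.extend([0] * (max_len - len(installed_parts)))
--         current_parts.extend([0] * (max_len - len(current_parts)))
--
--         if current_parts > installed_parts:
--             return (True, f"upgrade from {installed_version}")
--         elif current_parts < installed_parts:
--             return (True, f"downgrade from {installed_version}")
--         else:
--             return (False, "version unchanged")
--     except ValueError:
--         # Fallback to string comparison
--         if installed_version != current_version:
--             return (True, f"version changed from {installed_version}")
--         return (False, "version unchanged")
-- ===== SOURCE B (Python) =====
-- def _cmp(a, b):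
--     """Three-way compare of part lists; missing components count as 0."""
--     if not a and not b:
--         return 0
--     x = a[0] if a else 0
--     y = b[0] if b else 0
--     if x != y:
--         return -1 if x < y else 1
--     return _cmp(a[1:], b[1:])
--
-- def _int_tokens(tokens):
--     """Parse every token with int(); recursion instead of a comprehension."""
--     if not tokens:
--         return []
--     return [int(tokens[0])] + _int_tokens(tokens[1:])
--
-- def _try_sign(installed, current):
--     return _cmp(_int_tokens(installed.split(".")), _int_tokens(current.split(".")))
--
-- def check_upgrade_needed(installed_version, current_version, force=False):
--     if force:
--         return (True, "forced reinstall")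
--     if installed_version is None:
--         return (True, "fresh install")
--     if installed_version == current_version:
--         return (False, "version unchanged")
--     try:
--         sign = _try_sign(installed_version, current_version)
--     except ValueError:
--         if installed_version != current_version:
--             return (True, f"version changed from {installed_version}")
--         return (False, "version unchanged")
--     return {
--         -1: (True, f"upgrade from {installed_version}"),
--         0: (False, "version unchanged"),
--         1: (True, f"downgrade from {installed_version}"),
--     }[sign]
-- ===== Notes on version B (the rewrite author's own statement) =====
-- stated objective: alternative
-- what changed: Replaces A's pad-both-lists-then-builtin-list-comparison and if/elif chain by a recursive three-way comparator that reads missing components as 0 and whose sign (-1/0/1) indexes a result-table dict; guard clauses and the ValueError string-comparison fallback are kept identical.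
import Mathlib
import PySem

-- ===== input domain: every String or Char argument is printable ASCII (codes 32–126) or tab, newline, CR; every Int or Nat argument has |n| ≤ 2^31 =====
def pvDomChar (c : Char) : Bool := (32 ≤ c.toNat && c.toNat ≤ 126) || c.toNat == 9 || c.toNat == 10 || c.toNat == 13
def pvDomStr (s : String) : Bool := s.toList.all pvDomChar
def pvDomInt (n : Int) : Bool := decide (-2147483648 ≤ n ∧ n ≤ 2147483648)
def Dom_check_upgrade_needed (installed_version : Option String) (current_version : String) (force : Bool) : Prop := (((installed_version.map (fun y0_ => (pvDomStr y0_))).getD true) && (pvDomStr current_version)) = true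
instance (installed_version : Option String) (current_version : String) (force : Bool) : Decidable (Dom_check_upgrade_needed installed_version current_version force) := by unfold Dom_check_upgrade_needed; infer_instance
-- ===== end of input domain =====

-- B replaces A's pad-both-lists + builtin list comparison + if/elif chain by a recursive
-- three-way comparator (missing components read as 0) whose sign indexes a result table
-- (objective: alternative decomposition, same cost).

-- ===== PORT A =====
-- [int(x) for x in s.split(".")]; none = a ValueError in the comprehension
def parseParts (s : String) : Option (List Int) :=
  (PySem.Chars.splitOn s.toList ['.']).mapM PySem.Int.ofChars?

-- Python's list-of-int comparison a < b (first difference decides, else shorter < longer)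
def pyListLt : List Int → List Int → Bool
  | [], [] => false
  | [], _ :: _ => true
  | _ :: _, [] => false
  | a :: as, b :: bs => if a < b then true else if b < a then false else pyListLt as bs

def check_upgrade_needed (installed_version : Option String) (current_version : String) (force : Bool) : Bool × String :=
  if force then (true, "forced reinstall")
  else
    match installed_version with
    | none => (true, "fresh install")
    | some installed =>
      if installed = current_version then (false, "version unchanged")
      else
        match parseParts installed, parseParts current_version with
        | some installed_parts, some current_parts =>
            let max_len := max installed_parts.length current_parts.length
            let installed_parts := installed_parts ++ List.replicate (max_len - installed_parts.length) 0
            let current_parts := current_parts ++ List.replicate (max_len - current_parts.length) 0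
            if pyListLt installed_parts current_parts then (true, "upgrade from " ++ installed)
            else if pyListLt current_parts installed_parts then (true, "downgrade from " ++ installed)
            else (false, "version unchanged")
        | _, _ =>
            if installed ≠ current_version then (true, "version changed from " ++ installed)
            else (false, "version unchanged")

-- ===== PORT B =====
-- B's parse of the try-block comprehension, written as explicit recursion over the tokens
def intTokens : List (List Char) → Option (List Int)
  | [] => some []
  | t :: ts =>
    match PySem.Int.ofChars? t with
    | none => none          -- ValueError
    | some v =>
      match intTokens ts with
      | none => none
      | some vs => some (v :: vs)

def parsePartsB (s : String) : Option (List Int) :=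
  intTokens (PySem.Chars.splitOn s.toList ['.'])

-- _cmp(a, b): three-way compare, missing components count as 0
def cmp3 (a b : List Int) : Int :=
  if a = [] ∧ b = [] then 0
  else
    let x := a.headD 0   -- a[0] if a else 0
    let y := b.headD 0   -- b[0] if b else 0
    if x ≠ y then (if x < y then -1 else 1)
    else cmp3 a.tail b.tail
termination_by a.length + b.length
decreasing_by
  rename_i h
  cases a <;> cases b <;> simp_all <;> omega

-- the {-1: …, 0: …, 1: …} dict literal
def resultTable (installed : String) : PySem.Dict Int (Bool × String) :=
  PySem.Dict.ofList
    [(-1, (true, "upgrade from " ++ installed)),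
     (0, (false, "version unchanged")),
     (1, (true, "downgrade from " ++ installed))]

-- the try-block body: sign = _cmp(parse installed, parse current); none = a ValueError
def trySign (installed current : String) : Option Int :=
  (parsePartsB installed).bind fun ip => (parsePartsB current).map fun cp => cmp3 ip cp

def check_upgrade_needed_alt (installed_version : Option String) (current_version : String) (force : Bool) : Bool × String :=
  if force then (true, "forced reinstall")
  else
    installed_version.elim (true, "fresh install") fun installed =>
      if installed = current_version then (false, "version unchanged")
      else
        (trySign installed current_version).elim
          (if installed ≠ current_version then (true, "version changed from " ++ installed)
           else (false, "version unchanged"))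
          -- d[sign]; none would be a KeyError, unreachable since sign ∈ {-1, 0, 1}
          (fun sign => ((resultTable installed).get? sign).getD (false, "version unchanged"))

-- ===== PRECONDITION & SPEC =====
def Spec_check_upgrade_needed (installed_version : Option String) (current_version : String) (force : Bool) (out : Bool × String) : Prop := out = check_upgrade_needed_alt installed_version current_version force
instance (installed_version : Option String) (current_version : String) (force : Bool) (out : Bool × String) : Decidable (Spec_check_upgrade_needed installed_version current_version force out) := by unfold Spec_check_upgrade_needed; infer_instance

-- ===== CLAIM (what is proved, stated in full; the proofs are below) =====
def Claim_equal_check_upgrade_needed : Prop := ∀ (installed_version : Option String) (current_version : String) (force : Bool), Dom_check_upgrade_needed installed_version current_version force → Spec_check_upgrade_needed installed_version current_version force (check_upgrade_needed installed_version current_version force)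

-- ===== LEMMAS AND PROOFS =====

-- proof-only three-way comparator on equal-length lists
def cmpEq : List Int → List Int → Int
  | a :: as, b :: bs => if a < b then -1 else if b < a then 1 else cmpEq as bs
  | _, _ => 0

lemma pyListLt_cmpEq : ∀ (as bs : List Int), as.length = bs.length →
    pyListLt as bs = decide (cmpEq as bs = -1) ∧ pyListLt bs as = decide (cmpEq as bs = 1) := by
  intro as
  induction as with
  | nil => intro bs h; cases bs with
    | nil => simp [pyListLt, cmpEq]
    | cons b bs => simp at h
  | cons a as ih =>
    intro bs h
    cases bs with
    | nil => simp at h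
    | cons b bs =>
      simp only [List.length_cons, Nat.add_right_cancel_iff] at h
      simp only [pyListLt, cmpEq]
      rcases lt_trichotomy a b with hlt | heq | hgt
      · simp [hlt, not_lt.mpr (le_of_lt hlt)]
      · simp [heq, ih bs h]
      · simp [hgt, not_lt.mpr (le_of_lt hgt)]

lemma cmpEq_trichot : ∀ (as bs : List Int), cmpEq as bs = -1 ∨ cmpEq as bs = 0 ∨ cmpEq as bs = 1 := by
  intro as
  induction as with
  | nil => intro bs; cases bs <;> simp [cmpEq]
  | cons a as ih =>
    intro bs
    cases bs with
    | nil => simp [cmpEq]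
    | cons b bs =>
      simp only [cmpEq]
      split_ifs <;> simp [ih bs]

lemma cmpEq_zeros : ∀ (n : Nat), cmpEq (List.replicate n 0) (List.replicate n 0) = 0 := by
  intro n
  induction n with
  | zero => simp [cmpEq]
  | succ n ih => simp [List.replicate_succ, cmpEq, ih]

lemma cmp3_eq_cmpEq_pad : ∀ (n : Nat) (as bs : List Int), as.length ≤ n → bs.length ≤ n →
    cmp3 as bs = cmpEq (as ++ List.replicate (n - as.length) 0) (bs ++ List.replicate (n - bs.length) 0) := by
  intro n
  induction n with
  | zero =>
    intro as bs ha hb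
    have : as = [] := List.eq_nil_of_length_eq_zero (by omega)
    have hb' : bs = [] := List.eq_nil_of_length_eq_zero (by omega)
    subst this; subst hb'
    simp [cmp3, cmpEq]
  | succ n ih =>
    intro as bs ha hb
    cases as with
    | nil =>
      cases bs with
      | nil =>
        rw [cmp3]
        simp only [List.length_nil, Nat.sub_zero, List.nil_append,
          List.replicate_succ, cmpEq]
        simp [cmpEq_zeros]
      | cons b bs =>
        rw [cmp3]
        have hb' : bs.length ≤ n := by simp at hb; omega
        simp only [List.length_nil, Nat.sub_zero, List.nil_append, List.replicate_succ,
          List.length_cons, List.cons_append]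
        have hlen : (n + 1) - (bs.length + 1) = n - bs.length := by omega
        rw [hlen]
        simp only [cmpEq]
        rcases lt_trichotomy (0 : Int) b with hlt | heq | hgt
        · simp [hlt, not_lt.mpr (le_of_lt hlt), hlt.ne]
        · simp [← heq, ih [] bs (by simp) hb', cmp3]
        · simp [hgt, not_lt.mpr (le_of_lt hgt), hgt.ne']
    | cons a as =>
      have ha' : as.length ≤ n := by simp at ha; omega
      cases bs with
      | nil =>
        rw [cmp3]
        simp only [List.length_nil, Nat.sub_zero, List.nil_append, List.replicate_succ,
          List.length_cons, List.cons_append]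
        have hlen : (n + 1) - (as.length + 1) = n - as.length := by omega
        rw [hlen]
        simp only [cmpEq]
        rcases lt_trichotomy a (0 : Int) with hlt | heq | hgt
        · simp [hlt, not_lt.mpr (le_of_lt hlt), hlt.ne]
        · simp [heq, ih as [] ha' (by simp), cmp3]
        · simp [hgt, not_lt.mpr (le_of_lt hgt), hgt.ne']
      | cons b bs =>
        have hb' : bs.length ≤ n := by simp at hb; omega
        rw [cmp3]
        simp only [List.length_cons, List.cons_append]
        have h1 : (n + 1) - (as.length + 1) = n - as.length := by omega
        have h2 : (n + 1) - (bs.length + 1) = n - bs.length := by omega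
        rw [h1, h2]
        simp only [cmpEq]
        rcases lt_trichotomy a b with hlt | heq | hgt
        · simp [hlt, not_lt.mpr (le_of_lt hlt), hlt.ne]
        · simp [heq, ih as bs ha' hb']
        · simp [hgt, not_lt.mpr (le_of_lt hgt), hgt.ne']

lemma core_eq (installed : String) (ip cp : List Int) :
    (let max_len := max ip.length cp.length
     let ip' := ip ++ List.replicate (max_len - ip.length) 0
     let cp' := cp ++ List.replicate (max_len - cp.length) 0
     if pyListLt ip' cp' then (true, "upgrade from " ++ installed)
     else if pyListLt cp' ip' then (true, "downgrade from " ++ installed)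
     else ((false, "version unchanged") : Bool × String)) =
    ((resultTable installed).get? (cmp3 ip cp)).getD (false, "version unchanged") := by
  set n := max ip.length cp.length with hn
  have hlen : (ip ++ List.replicate (n - ip.length) 0).length =
      (cp ++ List.replicate (n - cp.length) 0).length := by
    simp only [List.length_append, List.length_replicate]; omega
  obtain ⟨e1, e2⟩ := pyListLt_cmpEq _ _ hlen
  simp only [e1, e2]
  rw [cmp3_eq_cmpEq_pad n ip cp (le_max_left _ _) (le_max_right _ _)]
  rcases cmpEq_trichot (ip ++ List.replicate (n - ip.length) 0)
    (cp ++ List.replicate (n - cp.length) 0) with h | h | h <;>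
    simp [h, resultTable, PySem.Dict.ofList, PySem.Dict.update, PySem.Dict.insert,
      PySem.Dict.empty, PySem.Dict.get?, PySem.Dict.contains, PySem.Dict.items, List.find?]

-- ===== VERDICT (by name: the statement is the Claim_ definition above) =====
theorem check_upgrade_needed_spec : Claim_equal_check_upgrade_needed := by
  intro installed_version current_version force _
  unfold Spec_check_upgrade_needed check_upgrade_needed check_upgrade_needed_alt
  by_cases hf : force = true
  · simp [hf]
  · simp only [Bool.not_eq_true] at hf
    simp only [hf, Bool.false_eq_true, if_false]
    cases installed_version with
    | none => rfl
    | some installed =>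
      by_cases he : installed = current_version
      · simp [he]
      · simp only [he, if_false, Option.elim]
        have hB : ∀ t, parsePartsB t = parseParts t := by
          intro t
          unfold parsePartsB parseParts
          generalize PySem.Chars.splitOn t.toList ['.'] = toks
          induction toks with
          | nil => rfl
          | cons x xs ih =>
            simp only [intTokens, List.mapM_cons, ← ih]
            cases PySem.Int.ofChars? x <;> cases intTokens xs <;> rfl
        unfold trySign
        rw [hB, hB]
        cases hp : parseParts installed with
        | none => simp [he]
        | some ip =>
          cases hq : parseParts current_version with
          | none => simp [he]
          | some cp => simpa using core_eq installed ip cp
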